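-- pv_equiv track=rewrite | github.com/Siddharth-10/Miscellaneous-Competitive-Code | lovely-lucky-lambs.py | generous
-- ===== SOURCE A (Python) =====
-- def generous(total_lambs):
--     i = 1
--     total = 0
--     count  = 0
--     while total + i <= total_lambs:
--         total = total + i
--         count = count + 1
--         i = i*2
--
--     return count
-- ===== SOURCE B (Python) =====
-- def generous(total_lambs):
--     if total_lambs < 1:
--         return 0
--     return (total_lambs + 1).bit_length() - 1
-- ===== Notes on version B (the rewrite author's own statement) =====
-- stated objective: simpler
-- what changed: Replaces the doubling accumulation loop with the closed form floor(log2(total_lambs+1)) computed via bit_length, guarded to 0 for inputs below 1.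
import Mathlib
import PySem

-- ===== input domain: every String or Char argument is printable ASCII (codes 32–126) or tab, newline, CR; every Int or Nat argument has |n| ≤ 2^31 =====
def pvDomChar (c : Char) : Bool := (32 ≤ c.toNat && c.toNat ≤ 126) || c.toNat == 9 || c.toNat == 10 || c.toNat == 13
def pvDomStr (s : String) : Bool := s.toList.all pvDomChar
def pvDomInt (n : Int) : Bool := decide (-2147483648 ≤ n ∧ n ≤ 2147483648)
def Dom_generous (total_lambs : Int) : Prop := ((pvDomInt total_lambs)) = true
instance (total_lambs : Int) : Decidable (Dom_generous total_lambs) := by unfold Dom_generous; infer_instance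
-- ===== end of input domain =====

-- B replaces A's doubling loop by the closed form floor(log2(total_lambs+1)) via bit_length (simpler).

-- ===== PORT A =====
-- the while loop of A: state (i, total, count); 0 < i is an invariant of the loop used for termination
def generousLoop (total_lambs i total count : Int) (hi : 0 < i) : Int :=
  if total + i ≤ total_lambs then
    generousLoop total_lambs (i * 2) (total + i) (count + 1) (by omega)
  else count
termination_by (total_lambs + 1 - (total + i)).toNat
decreasing_by omega

def generous (total_lambs : Int) : Int :=
  generousLoop total_lambs 1 0 0 (by norm_num)

-- ===== PORT B =====
-- (total_lambs + 1).bit_length() is Nat.size of the (nonnegative) value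
def generous_alt (total_lambs : Int) : Int :=
  if total_lambs < 1 then 0
  else ((Nat.size (total_lambs + 1).toNat : Int) - 1)

-- ===== PRECONDITION & SPEC =====
def Spec_generous (total_lambs : Int) (out : Int) : Prop := out = generous_alt total_lambs
instance (total_lambs : Int) (out : Int) : Decidable (Spec_generous total_lambs out) := by unfold Spec_generous; infer_instance

-- ===== CLAIM (what is proved, stated in full; the proofs are below) =====
def Claim_equal_generous : Prop := ∀ (total_lambs : Int), Dom_generous total_lambs → Spec_generous total_lambs (generous total_lambs)

-- ===== LEMMAS AND PROOFS =====

-- loop invariant: from state (2^k, 2^k - 1, k) the loop returns size(L+1) - 1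
theorem generousLoop_pow (L : Int) (i total count : Int) (hi : 0 < i) :
    ∀ k : Nat, i = 2 ^ k → total = 2 ^ k - 1 → count = (k : Int) → (2 : Int) ^ k ≤ L + 1 →
    generousLoop L i total count hi = (Nat.size (L + 1).toNat : Int) - 1 := by
  fun_induction generousLoop L i total count hi with
  | case1 i total count hi hcond ih =>
      intro k hik htot hcnt hle
      subst hik htot hcnt
      have hstep : (2 : Int) ^ (k + 1) ≤ L + 1 := by rw [pow_succ]; omega
      exact ih (k + 1) (by ring) (by rw [pow_succ]; ring) (by push_cast; ring) hstep
  | case2 i total count hi hcond =>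
      intro k hik htot hcnt hle
      subst hik htot hcnt
      -- here 2^k ≤ L+1 < 2^(k+1), so size (L+1).toNat = k+1
      have h1 : (L + 1) < (2 : Int) ^ (k + 1) := by rw [pow_succ]; omega
      have hpos : 0 < L + 1 := lt_of_lt_of_le (by positivity) hle
      have hlo : 2 ^ k ≤ (L + 1).toNat := by
        have : ((2 ^ k : Nat) : Int) ≤ ((L + 1).toNat : Int) := by push_cast; omega
        exact_mod_cast this
      have hhi2 : (L + 1).toNat < 2 ^ (k + 1) := by
        have : ((L + 1).toNat : Int) < ((2 ^ (k + 1) : Nat) : Int) := by push_cast; omega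
        exact_mod_cast this
      have hsz : Nat.size (L + 1).toNat = k + 1 :=
        le_antisymm (Nat.size_le.mpr hhi2) (Nat.lt_size.mpr hlo)
      rw [hsz]; push_cast; ring

-- ===== VERDICT (by name: the statement is the Claim_ definition above) =====
theorem generous_spec : Claim_equal_generous := by
  intro L _
  unfold Spec_generous generous generous_alt
  by_cases hL : L < 1
  · rw [generousLoop]
    simp only [if_neg (by omega : ¬ (0 + 1 ≤ L))]
    simp [hL]
  · rw [if_neg hL]
    exact generousLoop_pow L 1 0 0 (by norm_num) 0 (by norm_num) (by norm_num)
      (by norm_num) (by norm_num; omega)
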